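-- pv_equiv track=rewrite | github.com/RobbStarkAustria/mensural_to_mei | mensural_to_mei/utils.py | convert_to_combined_list_with_metadata
-- ===== SOURCE A (Python) =====
-- def convert_to_combined_list_with_metadata(d: dict) -> tuple:
--     """ Converts a dictionary of lists to a combined list and a dictionary of metadata. """
--     combined_list = []
--     metadata = {}
--     counter = 0
--     for k, v in d.items():
--         for s in v:
--             combined_list.append(s)
--             metadata[counter] = k
--             counter += 1
--
--     return combined_list, metadata
-- ===== SOURCE B (Python) =====
-- def _merge(items):
--     """ Divide and conquer: combine the two halves, shifting the right half's
--     indices by the length of the left half's combined list. """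
--     if not items:
--         return [], []
--     if len(items) == 1:
--         k, v = items[0]
--         return list(v), [(i, k) for i, _ in enumerate(v)]
--     mid = len(items) // 2
--     left_combined, left_pairs = _merge(items[:mid])
--     right_combined, right_pairs = _merge(items[mid:])
--     off = len(left_combined)
--     return left_combined + right_combined, left_pairs + [(i + off, kk) for i, kk in right_pairs]
--
--
-- def convert_to_combined_list_with_metadata(d: dict) -> tuple:
--     """ Converts a dictionary of lists to a combined list and a dictionary of metadata. """
--     combined_list, pairs = _merge(list(d.items()))
--     return combined_list, dict(pairs)
-- ===== Notes on version B (the rewrite author's own statement) =====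
-- stated objective: alternative
-- what changed: Replaces A's single forward loop threading a running counter through list appends and dict writes with a divide-and-conquer recursion: each half is flattened independently with indices starting at 0, and the right half's indices are shifted by the left half's length when the halves are merged; the dict is built from the final pair list at the end.
import Mathlib
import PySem

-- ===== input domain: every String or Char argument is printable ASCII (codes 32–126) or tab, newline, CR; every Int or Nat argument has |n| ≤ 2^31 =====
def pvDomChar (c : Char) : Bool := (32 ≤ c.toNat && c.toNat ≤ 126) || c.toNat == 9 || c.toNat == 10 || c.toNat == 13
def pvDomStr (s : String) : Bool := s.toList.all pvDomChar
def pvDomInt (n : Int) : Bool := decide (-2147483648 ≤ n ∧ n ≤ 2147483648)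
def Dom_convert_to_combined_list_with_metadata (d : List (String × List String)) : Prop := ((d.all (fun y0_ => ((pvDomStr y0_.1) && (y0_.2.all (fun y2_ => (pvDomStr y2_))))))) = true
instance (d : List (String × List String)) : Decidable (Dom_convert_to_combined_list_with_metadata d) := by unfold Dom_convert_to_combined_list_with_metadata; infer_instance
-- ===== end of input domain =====

-- B replaces A's counter-threading single loop by a divide-and-conquer merge that flattens each half independently and shifts the right half's indices (objective: alternative; return value only).


-- ===== PORT A =====
-- the body of A's inner loop: append s, write metadata[counter] = k, bump counter
def pvAStep (k : String) (st : List String × PySem.Dict Int String × Int) (s : String) :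
    List String × PySem.Dict Int String × Int :=
  (st.1 ++ [s], st.2.1.insert st.2.2 k, st.2.2 + 1)

def convert_to_combined_list_with_metadata (d : List (String × List String)) :
    List String × (List (Int × String)) :=
  let st := d.foldl (fun st kv => kv.2.foldl (pvAStep kv.1) st)
    ([], PySem.Dict.empty, (0 : Int))
  (st.1, st.2.1.items)

-- ===== PORT B =====
-- _merge: divide and conquer over the item list; items[:mid]/items[mid:] with
-- 0 ≤ mid ≤ len are exactly take/drop, and len(items)//2 on a Nat is Nat division.
def pvMerge : List (String × List String) → List String × List (Int × String)
  | [] => ([], [])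
  | [kv] => (kv.2, (PySem.List.enumerate kv.2 0).map (fun p => (p.1, kv.1)))
  | a :: b :: rest =>
    let mid := (a :: b :: rest).length / 2
    let l := pvMerge ((a :: b :: rest).take mid)
    let r := pvMerge ((a :: b :: rest).drop mid)
    (l.1 ++ r.1, l.2 ++ r.2.map (fun p => (p.1 + (l.1.length : Int), p.2)))
termination_by items => items.length
decreasing_by
  · simp; omega
  · simp; omega

def convert_to_combined_list_with_metadata_alt (d : List (String × List String)) :
    List String × (List (Int × String)) :=
  let m := pvMerge d
  (m.1, (PySem.Dict.ofList m.2).items)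

-- ===== PRECONDITION & SPEC =====
def Spec_convert_to_combined_list_with_metadata (d : List (String × List String)) (out : List String × (List (Int × String))) : Prop := out = convert_to_combined_list_with_metadata_alt d
instance (d : List (String × List String)) (out : List String × (List (Int × String))) : Decidable (Spec_convert_to_combined_list_with_metadata d out) := by unfold Spec_convert_to_combined_list_with_metadata; infer_instance

-- ===== CLAIM (what is proved, stated in full; the proofs are below) =====
def Claim_equal_convert_to_combined_list_with_metadata : Prop := ∀ (d : List (String × List String)), Dom_convert_to_combined_list_with_metadata d → Spec_convert_to_combined_list_with_metadata d (convert_to_combined_list_with_metadata d)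

-- ===== LEMMAS AND PROOFS =====

-- the flat key list: each key repeated once per element of its value list
def pvKeys (d : List (String × List String)) : List String :=
  d.flatMap (fun kv => kv.2.map (fun _ => kv.1))

theorem pvKeys_length (d : List (String × List String)) :
    (pvKeys d).length = (d.flatMap (fun kv => kv.2)).length := by
  induction d with
  | nil => rfl
  | cons kv rest ih =>
    simp only [pvKeys, List.flatMap_cons, List.length_append, List.length_map] at ih ⊢
    omega

theorem pvKeys_append (xs ys : List (String × List String)) :
    pvKeys (xs ++ ys) = pvKeys xs ++ pvKeys ys := by
  simp [pvKeys]

-- shifting all indices of an enumeration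
theorem pvEnumShift {α : Type} (xs : List α) (c n : Int) :
    (PySem.List.enumerate xs c).map (fun p => (p.1 + n, p.2)) =
      PySem.List.enumerate xs (c + n) := by
  induction xs generalizing c with
  | nil => simp [PySem.List.enumerate_nil]
  | cons x xs ih =>
    simp only [PySem.List.enumerate_cons, List.map_cons, ih]
    ring_nf

-- replacing each enumerated element by a constant
theorem pvEnumConst (v : List String) (k : String) (c : Int) :
    (PySem.List.enumerate v c).map (fun p => (p.1, k)) =
      PySem.List.enumerate (v.map (fun _ => k)) c := by
  induction v generalizing c with
  | nil => simp [PySem.List.enumerate_nil]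
  | cons x xs ih => simp [PySem.List.enumerate_cons, ih]

-- B's merge computes the flattened values and the 0-based enumeration of the flat key list
theorem pvMerge_eq (items : List (String × List String)) :
    pvMerge items = (items.flatMap (fun kv => kv.2), PySem.List.enumerate (pvKeys items) 0) := by
  induction items using pvMerge.induct with
  | case1 => simp [pvMerge, pvKeys, PySem.List.enumerate_nil]
  | case2 kv => simp [pvMerge, pvKeys, pvEnumConst]
  | case3 a b rest mid ihl ihr =>
    rw [pvMerge]
    rw [show (a :: b :: rest).length / 2 = mid from rfl]
    rw [ihl, ihr]
    conv_rhs => rw [← List.take_append_drop mid (a :: b :: rest)]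
    rw [List.flatMap_append, pvKeys_append, PySem.List.enumerate_append]
    dsimp only
    rw [pvEnumShift]
    simp only [pvKeys_length, zero_add]

-- a dict built from pairs with distinct keys lists exactly those pairs
theorem pvOfList_items (pairs : List (Int × String)) (h : (pairs.map Prod.fst).Nodup) :
    (PySem.Dict.ofList pairs).items = pairs := by
  have h2 := PySem.Dict.items_foldl_insert_fresh (l := pairs) (k := Prod.fst)
    (v := Prod.snd) (d := PySem.Dict.empty)
    (by intro a _; exact PySem.Dict.contains_empty _) h
  simpa [PySem.Dict.empty] using h2

-- A's inner loop over one value list, from a state whose dict keys are all < counter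
theorem pvInner (k : String) (v : List String) (acc : List String)
    (m : PySem.Dict Int String) (c : Int) (h : ∀ p ∈ m.items, p.1 < c) :
    v.foldl (pvAStep k) (acc, m, c) =
      (acc ++ v, PySem.Dict.mk (m.items ++ PySem.List.enumerate (v.map (fun _ => k)) c),
        c + v.length) := by
  induction v generalizing acc m c with
  | nil =>
    simp [PySem.List.enumerate_nil]
  | cons s vs ih =>
    have hcon : m.contains c = false := by
      rw [PySem.Dict.contains_eq_decide_mem_keys]
      simp only [decide_eq_false_iff_not, PySem.Dict.keys, List.mem_map]
      rintro ⟨p, hp, hpc⟩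
      exact absurd (hpc ▸ h p hp) (lt_irrefl c)
    have hins : (m.insert c k).items = m.items ++ [(c, k)] := by
      simp [PySem.Dict.items_insert, hcon]
    show vs.foldl (pvAStep k) (pvAStep k (acc, m, c) s) = _
    rw [show pvAStep k (acc, m, c) s = (acc ++ [s], m.insert c k, c + 1) from rfl]
    have h' : ∀ p ∈ (m.insert c k).items, p.1 < c + 1 := by
      rw [hins]; intro p hp
      rcases List.mem_append.1 hp with hp | hp
      · exact lt_trans (h p hp) (by omega)
      · simp at hp; rw [hp]; omega
    have := ih (acc ++ [s]) (m.insert c k) (c + 1) h'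
    rw [this, hins]
    simp [PySem.List.enumerate_cons, List.append_assoc]
    omega

-- A's outer loop, same invariant
theorem pvOuter (d : List (String × List String)) (acc : List String)
    (m : PySem.Dict Int String) (c : Int) (h : ∀ p ∈ m.items, p.1 < c) :
    d.foldl (fun st kv => kv.2.foldl (pvAStep kv.1) st) (acc, m, c) =
      (acc ++ d.flatMap (fun kv => kv.2),
        PySem.Dict.mk (m.items ++ PySem.List.enumerate (pvKeys d) c),
        c + (d.flatMap (fun kv => kv.2)).length) := by
  induction d generalizing acc m c with
  | nil =>
    simp [pvKeys, PySem.List.enumerate_nil]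
  | cons kv rest ih =>
    simp only [List.foldl_cons]
    rw [pvInner kv.1 kv.2 acc m c h]
    have h' : ∀ p ∈ (PySem.Dict.mk (m.items ++
        PySem.List.enumerate (kv.2.map (fun _ => kv.1)) c)).items, p.1 < c + kv.2.length := by
      intro p hp
      simp only [] at hp
      rcases List.mem_append.1 hp with hp | hp
      · exact lt_of_lt_of_le (h p hp) (by omega)
      · rcases (PySem.List.mem_enumerate_iff _ _ _).1 hp with ⟨j, hj, rfl⟩
        rw [List.length_map] at hj; simp; omega
    rw [ih _ _ _ h']
    simp only [pvKeys, List.flatMap_cons, List.append_assoc,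
      PySem.List.enumerate_append, List.length_map, List.length_append]
    simp only [Prod.mk.injEq, true_and]
    push_cast
    ring

-- ===== VERDICT (by name: the statement is the Claim_ definition above) =====
theorem convert_to_combined_list_with_metadata_spec : Claim_equal_convert_to_combined_list_with_metadata := by
  intro d _
  unfold Spec_convert_to_combined_list_with_metadata
  have hB : convert_to_combined_list_with_metadata_alt d =
      (d.flatMap (fun kv => kv.2), PySem.List.enumerate (pvKeys d) 0) := by
    unfold convert_to_combined_list_with_metadata_alt
    rw [pvMerge_eq]
    have hnd : ((PySem.List.enumerate (pvKeys d) 0).map Prod.fst).Nodup := by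
      rw [PySem.List.map_fst_enumerate]
      exact PySem.List.nodup_pyRange_one _ _
    simp only [pvOfList_items _ hnd]
  rw [hB]
  unfold convert_to_combined_list_with_metadata
  rw [pvOuter d [] PySem.Dict.empty 0 (by intro p hp; simp [PySem.Dict.empty] at hp)]
  simp [PySem.Dict.empty]
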